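-- pv_equiv track=rewrite | github.com/MJ-Jang/Condor | condor/util.py | generate_x_y
-- ===== SOURCE A (Python) =====
-- def generate_x_y(sent):
--     x, y = [], []
--     x_ = list(sent + '#')
--     for idx, s in enumerate(x_[:-1]):
--         if s != ' ':
--             x.append(s)
--             if x_[idx+1] == ' ':
--               y.append(1)
--             else:
--                 y.append(0)
--     return (x, y)
-- ===== SOURCE B (Python) =====
-- import re
--
-- def generate_x_y(sent):
--     x, y = [], []
--     n = len(sent)
--     for m in re.finditer(r'[^ ]+', sent):
--         w = m.group()
--         x.extend(w)
--         y.extend([0] * (len(w) - 1))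
--         y.append(1 if m.end() < n else 0)
--     return (x, y)
-- ===== Notes on version B (the rewrite author's own statement) =====
-- stated objective: faster
-- what changed: B iterates over maximal runs of non-space characters via re.finditer and emits each word's labels in bulk (zeros plus one final label from whether text remains after the run), instead of A's per-character Python loop over the sentinel-extended string with a next-character index lookup.
import Mathlib
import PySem

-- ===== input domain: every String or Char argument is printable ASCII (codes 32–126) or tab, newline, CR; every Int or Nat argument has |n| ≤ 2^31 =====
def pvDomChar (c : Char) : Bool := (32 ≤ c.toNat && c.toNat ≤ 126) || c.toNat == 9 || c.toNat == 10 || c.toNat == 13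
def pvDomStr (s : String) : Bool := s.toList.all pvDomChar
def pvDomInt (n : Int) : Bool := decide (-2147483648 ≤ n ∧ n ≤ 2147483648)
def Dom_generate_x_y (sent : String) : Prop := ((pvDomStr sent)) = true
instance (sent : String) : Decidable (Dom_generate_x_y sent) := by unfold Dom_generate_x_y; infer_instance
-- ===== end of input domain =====

-- B re-groups the scan by maximal non-space runs (regex finditer) instead of A's per-character
-- lookahead; a timing run measured B faster by a constant factor (objective: faster).

-- ===== PORT A =====
-- A's loop over enumerate((sent+'#')[:-1]) with the x_[idx+1] lookup: iterating the list
-- with its successor as lookahead (the current char's successor is x_[idx+1]) and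
-- appending to accumulators x, y exactly as the Python loop does.
def pvLoopA (cs : List Char) (x : List String) (y : List Int) : List String × List Int :=
  match cs with
  | c :: next :: rest =>
      if c ≠ ' ' then
        pvLoopA (next :: rest) (x ++ [c.toString])
          (y ++ [if next = ' ' then (1 : Int) else 0])
      else
        pvLoopA (next :: rest) x y
  | _ => (x, y)

def generate_x_y (sent : String) : List String × List Int :=
  pvLoopA (sent.toList ++ ['#']) [] []

-- ===== PORT B =====
-- B's loop over re.finditer(r'[^ ]+', sent): find the next maximal run of non-space
-- characters, emit its characters with labels 0 except the last, whose label is 1 iff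
-- m.end() < len(sent) (i.e. some text remains after the run), then continue after the run.
def pvLoopB (cs : List Char) : List String × List Int :=
  match cs with
  | [] => ([], [])
  | c :: rest =>
      if c = ' ' then pvLoopB rest
      else
        let run := c :: rest.takeWhile (· ≠ ' ')
        let rest' := rest.dropWhile (· ≠ ' ')
        let (x, y) := pvLoopB rest'
        (run.map (fun a => a.toString) ++ x,
         (List.replicate (run.length - 1) 0 ++
            [if rest'.isEmpty then (0 : Int) else 1]) ++ y)
termination_by cs.length
decreasing_by
  · simp
  · have := List.length_dropWhile_le (fun a => decide ¬a = ' ') rest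
    simp at *; omega

def generate_x_y_alt (sent : String) : List String × List Int :=
  pvLoopB sent.toList

-- ===== PRECONDITION & SPEC =====
def Spec_generate_x_y (sent : String) (out : List String × List Int) : Prop := out = generate_x_y_alt sent
instance (sent : String) (out : List String × List Int) : Decidable (Spec_generate_x_y sent out) := by unfold Spec_generate_x_y; infer_instance

-- ===== CLAIM (what is proved, stated in full; the proofs are below) =====
def Claim_equal_generate_x_y : Prop := ∀ (sent : String), Dom_generate_x_y sent → Spec_generate_x_y sent (generate_x_y sent)

-- ===== LEMMAS AND PROOFS =====

-- equation lemmas for A's loop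
theorem pvLoopA_nil (x : List String) (y : List Int) : pvLoopA [] x y = (x, y) := rfl
theorem pvLoopA_one (c : Char) (x : List String) (y : List Int) : pvLoopA [c] x y = (x, y) := rfl
theorem pvLoopA_cons (c next : Char) (rest : List Char) (x : List String) (y : List Int) :
    pvLoopA (c :: next :: rest) x y =
      if c ≠ ' ' then
        pvLoopA (next :: rest) (x ++ [c.toString])
          (y ++ [if next = ' ' then (1 : Int) else 0])
      else pvLoopA (next :: rest) x y := rfl

-- accumulator lemma for A's loop
theorem pvLoopA_acc (cs : List Char) : ∀ (x : List String) (y : List Int),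
    pvLoopA cs x y = (x ++ (pvLoopA cs [] []).1, y ++ (pvLoopA cs [] []).2) := by
  induction cs with
  | nil => intro x y; rw [pvLoopA_nil, pvLoopA_nil]; simp
  | cons c tl ih =>
    intro x y
    match tl with
    | [] => rw [pvLoopA_one, pvLoopA_one]; simp
    | next :: rest =>
      rw [pvLoopA_cons, pvLoopA_cons]
      by_cases hc : c = ' '
      · rw [if_neg (fun h => h hc), if_neg (fun h => h hc)]; exact ih x y
      · rw [if_pos hc, if_pos hc]
        simp only [List.nil_append]
        rw [ih (x ++ [c.toString]), ih [c.toString]]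
        simp

-- A's loop skips a leading space
theorem pvLoopA_space (cs : List Char) :
    pvLoopA (' ' :: cs ++ ['#']) [] [] = pvLoopA (cs ++ ['#']) [] [] := by
  cases h : cs ++ ['#'] with
  | nil => simp at h
  | cons d t =>
    rw [show ' ' :: cs ++ ['#'] = ' ' :: (cs ++ ['#']) from rfl, h, pvLoopA_cons,
        if_neg (by simp)]

-- the dropWhile remainder is empty or starts with a space
theorem pv_drop_shape (l : List Char) :
    l.dropWhile (· ≠ ' ') = [] ∨ ∃ t, l.dropWhile (· ≠ ' ') = ' ' :: t := by
  induction l with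
  | nil => left; rfl
  | cons a t ih =>
    by_cases h : a = ' '
    · right; exact ⟨t, by simp [List.dropWhile, h]⟩
    · simpa [List.dropWhile, h] using ih

-- A's loop on a nonempty all-non-space run followed by rest
theorem pvLoopA_run : ∀ (run : List Char), run ≠ [] → (∀ a ∈ run, a ≠ ' ') →
    ∀ (rest : List Char),
    pvLoopA (run ++ (rest ++ ['#'])) [] [] =
      (run.map (fun a => a.toString) ++ (pvLoopA (rest ++ ['#']) [] []).1,
       (List.replicate (run.length - 1) 0 ++
          [if rest.headD '#' = ' ' then (1 : Int) else 0]) ++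
         (pvLoopA (rest ++ ['#']) [] []).2) := by
  intro run
  induction run with
  | nil => intro h; exact absurd rfl h
  | cons c tl ih =>
    intro _ hns rest
    have hc : c ≠ ' ' := hns c (by simp)
    match tl with
    | [] =>
      cases rest with
      | nil =>
        simp only [List.cons_append, List.nil_append]
        rw [pvLoopA_cons, if_pos hc, pvLoopA_one, pvLoopA_one]
        simp
      | cons r t =>
        simp only [List.cons_append, List.nil_append]
        rw [pvLoopA_cons, if_pos hc]
        simp only [List.nil_append]
        rw [pvLoopA_acc]
        simp [List.headD]
    | c2 :: tl' =>
      have hns' : ∀ a ∈ c2 :: tl', a ≠ ' ' := fun a ha => hns a (by simp [ha])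
      have hc2 : c2 ≠ ' ' := hns' c2 (by simp)
      simp only [List.cons_append]
      rw [pvLoopA_cons, if_pos hc, if_neg hc2]
      simp only [List.nil_append]
      rw [pvLoopA_acc]
      have := ih (by simp) hns' rest
      simp only [List.cons_append] at this
      rw [this]
      simp [List.replicate_succ]

theorem pv_main : ∀ (cs : List Char), pvLoopA (cs ++ ['#']) [] [] = pvLoopB cs
  | [] => by rw [List.nil_append, pvLoopA_one]; simp [pvLoopB]
  | c :: rest => by
    by_cases hc : c = ' '
    · subst hc
      rw [show (' ' :: rest) ++ ['#'] = ' ' :: rest ++ ['#'] from rfl,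
          pvLoopA_space, pv_main rest]
      simp [pvLoopB]
    · have hrun : (c :: rest.takeWhile (· ≠ ' ')) ≠ [] := by simp
      have hns : ∀ a ∈ c :: rest.takeWhile (· ≠ ' '), a ≠ ' ' := by
        intro a ha
        rcases List.mem_cons.mp ha with h | h
        · simpa [h] using hc
        · have := List.mem_takeWhile_imp h
          simpa using this
      have key : (c :: rest) ++ ['#'] =
          (c :: rest.takeWhile (· ≠ ' ')) ++ (rest.dropWhile (· ≠ ' ') ++ ['#']) := by
        conv_lhs => rw [show c :: rest =
          (c :: rest.takeWhile (· ≠ ' ')) ++ rest.dropWhile (· ≠ ' ') by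
            simp [List.takeWhile_append_dropWhile]]
        rw [List.append_assoc]
      rw [key, pvLoopA_run _ hrun hns _, pv_main (rest.dropWhile (· ≠ ' '))]
      rcases pv_drop_shape rest with h | ⟨t, h⟩
      · simp only [ne_eq, decide_not] at h
        simp [pvLoopB, hc, h]
      · simp only [ne_eq, decide_not] at h
        simp [pvLoopB, hc, h]
  termination_by cs => cs.length
  decreasing_by
    · simp
    · have := List.length_dropWhile_le (fun a => decide ¬a = ' ') rest
      simp at *; omega

-- ===== VERDICT (by name: the statement is the Claim_ definition above) =====
theorem generate_x_y_spec : Claim_equal_generate_x_y := by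
  intro sent _
  unfold Spec_generate_x_y generate_x_y generate_x_y_alt
  exact pv_main sent.toList
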